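-- pv_equiv track=rewrite | github.com/hyuuny/backjoon-algorithm | 백준/Bronze/1668. 트로피 진열/트로피 진열.py | view_cnt
-- ===== SOURCE A (Python) =====
-- def view_cnt(data):
--     height = data[0]
--     cnt = 1
--
--     for i in range(1, len(data)):
--         if height < data[i]:
--             cnt += 1
--             height = data[i]
--     return cnt
-- ===== SOURCE B (Python) =====
-- def view_cnt(data):
--     # two-pass: build the prefix-maximum table, then count strict rises in it
--     run = [data[0]]
--     for x in data[1:]:
--         run.append(max(run[-1], x))
--     rises = sum(1 for a, b in zip(run, run[1:]) if a < b)
--     return 1 + rises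
-- ===== Notes on version B (the rewrite author's own statement) =====
-- stated objective: alternative
-- what changed: B replaces A's single inline scan with a running (height, cnt) accumulator by a two-pass decomposition: first build the prefix-maximum table, then count strict rises between adjacent entries of that table.
import Mathlib
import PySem

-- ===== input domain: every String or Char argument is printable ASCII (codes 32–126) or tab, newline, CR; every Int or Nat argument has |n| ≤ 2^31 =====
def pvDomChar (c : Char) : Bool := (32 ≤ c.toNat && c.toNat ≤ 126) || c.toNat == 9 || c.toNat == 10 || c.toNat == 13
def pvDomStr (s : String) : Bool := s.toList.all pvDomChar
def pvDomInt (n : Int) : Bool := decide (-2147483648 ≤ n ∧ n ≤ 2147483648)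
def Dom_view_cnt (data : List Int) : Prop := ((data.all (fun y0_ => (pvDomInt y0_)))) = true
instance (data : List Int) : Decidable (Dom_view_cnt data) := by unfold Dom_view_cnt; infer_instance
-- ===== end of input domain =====

-- B re-implements A's inline max-tracking scan as a two-pass prefix-maximum table plus a
-- rise-counting scan over it (same O(n) cost, different decomposition).


-- ===== PORT A =====
-- 'for i in range(1, len(data))' with 'data[i]' visits exactly the tail of data, in order — exact.
def view_cnt (data : List Int) : Int :=
  match data with
  | [] => 0  -- unreachable: data[0] raises IndexError, excluded by Pre_view_cnt
  | h :: t =>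
    let st := t.foldl (fun (s : Int × Int) x => if s.1 < x then (x, s.2 + 1) else s) (h, 1)
    st.2

-- ===== PORT B =====
-- 'run[-1]': run is nonempty throughout the loop, so 'getLast?.getD 0' is exactly its last element.
def view_cnt_alt (data : List Int) : Int :=
  match data with
  | [] => 0  -- unreachable: data[0] raises IndexError, excluded by Pre_view_cnt
  | h :: t =>
    let run := t.foldl (fun (r : List Int) x => r ++ [max (r.getLast?.getD 0) x]) [h]
    1 + (run.zip run.tail).foldl (fun (acc : Int) p => acc + (if p.1 < p.2 then 1 else 0)) 0

-- ===== PRECONDITION & SPEC =====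
-- A evaluates data[0], which raises IndexError on the empty list; B does the same.
def Pre_view_cnt (data : List Int) : Prop := data ≠ []
instance (data : List Int) : Decidable (Pre_view_cnt data) := by unfold Pre_view_cnt; infer_instance
def pvWitness_view_cnt : List Int := [1, 3, 2]

def Spec_view_cnt (data : List Int) (out : Int) : Prop := out = view_cnt_alt data
instance (data : List Int) (out : Int) : Decidable (Spec_view_cnt data out) := by unfold Spec_view_cnt; infer_instance

-- ===== CLAIM (what is proved, stated in full; the proofs are below) =====
def Claim_equal_view_cnt : Prop := ∀ (data : List Int), Dom_view_cnt data → Pre_view_cnt data → Spec_view_cnt data (view_cnt data)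

-- ===== LEMMAS AND PROOFS =====

-- number of strict rises seen while scanning t with current maximum h
def risesFrom (h : Int) : List Int → Int
  | [] => 0
  | x :: t => if h < x then 1 + risesFrom x t else risesFrom h t

-- second component of A's fold
lemma foldA_snd (t : List Int) : ∀ (h c : Int),
    (t.foldl (fun (s : Int × Int) x => if s.1 < x then (x, s.2 + 1) else s) (h, c)).2
      = c + risesFrom h t := by
  induction t with
  | nil => intro h c; simp [risesFrom]
  | cons x t ih =>
    intro h c
    by_cases hx : h < x
    · simp [risesFrom, hx, ih, List.foldl_cons]; ring
    · simp [risesFrom, hx, ih, List.foldl_cons]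

-- adjacent-rise count of B's second pass
def zipCnt (r : List Int) : Int :=
  (r.zip r.tail).foldl (fun (acc : Int) p => acc + (if p.1 < p.2 then 1 else 0)) 0

lemma foldl_add_init (l : List (Int × Int)) : ∀ (c : Int),
    l.foldl (fun (acc : Int) p => acc + (if p.1 < p.2 then 1 else 0)) c
      = c + l.foldl (fun (acc : Int) p => acc + (if p.1 < p.2 then 1 else 0)) 0 := by
  induction l with
  | nil => intro c; simp
  | cons p l ih =>
    intro c
    simp only [List.foldl_cons]
    rw [ih, ih (0 + _)]
    ring

lemma zipCnt_cons_cons (a b : Int) (t : List Int) :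
    zipCnt (a :: b :: t) = (if a < b then 1 else 0) + zipCnt (b :: t) := by
  simp only [zipCnt, List.tail_cons, List.zip_cons_cons, List.foldl_cons]
  rw [foldl_add_init]
  ring

lemma zipCnt_append (r : List Int) (hne : r ≠ []) (y : Int) :
    zipCnt (r ++ [y]) = zipCnt r + (if r.getLast?.getD 0 < y then 1 else 0) := by
  induction r with
  | nil => exact absurd rfl hne
  | cons a r ih =>
    cases r with
    | nil => simp [zipCnt]
    | cons b r =>
      have ih' := ih (by simp)
      simp only [List.cons_append] at ih' ⊢
      rw [zipCnt_cons_cons a b (r ++ [y]), ih', zipCnt_cons_cons,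
        List.getLast?_cons_cons]
      ring

-- B's first pass: folding the table-builder over t adds risesFrom (last r) t rises
lemma foldB (t : List Int) : ∀ (r : List Int), r ≠ [] →
    zipCnt (t.foldl (fun (r : List Int) x => r ++ [max (r.getLast?.getD 0) x]) r)
      = zipCnt r + risesFrom (r.getLast?.getD 0) t := by
  induction t with
  | nil => intro r _; simp [risesFrom]
  | cons x t ih =>
    intro r hr
    simp only [List.foldl_cons]
    rw [ih (r ++ [max (r.getLast?.getD 0) x]) (by simp)]
    rw [zipCnt_append r hr]
    rw [List.getLast?_concat]
    by_cases hx : r.getLast?.getD 0 < x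
    · have hm : max (r.getLast?.getD 0) x = x := by omega
      simp only [hm, Option.getD_some, risesFrom, if_pos hx]
      ring
    · have hm : max (r.getLast?.getD 0) x = r.getLast?.getD 0 := by omega
      simp only [hm, Option.getD_some, risesFrom, if_neg hx]
      simp

-- ===== VERDICT (by name: the statement is the Claim_ definition above) =====
theorem view_cnt_spec : Claim_equal_view_cnt := by
  intro data _ hpre
  unfold Spec_view_cnt view_cnt view_cnt_alt
  cases data with
  | nil => exact absurd rfl hpre
  | cons h t =>
    show (t.foldl (fun (s : Int × Int) x => if s.1 < x then (x, s.2 + 1) else s) (h, 1)).2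
      = 1 + zipCnt (t.foldl (fun (r : List Int) x => r ++ [max (r.getLast?.getD 0) x]) [h])
    rw [foldA_snd, foldB t [h] (by simp)]
    simp [zipCnt]
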